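-- pv_equiv track=rewrite | github.com/danialza/Theory-Practice-of-AI-Practices | & Sidekicks.py | safe
-- ===== SOURCE A (Python) =====
-- def safe(state):
--     person_side, _ = state
--     for side in ["left","right"]:
--         lone_kik = [index for (person,index) in person_side
--                     if person == "kick"
--                     if person_side[(person,index)] == side
--                     if person_side[("hero",index)] != side]
--         present_hero = [index for (person,index) in person_side
--                         if person == "hero"
--                         if person_side[(person,index)] == side]
--
--         if lone_kik and present_hero:
--             return False
--     return True
-- ===== SOURCE B (Python) =====
-- def safe(state):
--     person_side, _ = state
--     hero_sides = set()
--     lone_kick_sides = set()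
--     for (person, index) in person_side:
--         side = person_side[(person, index)]
--         if side != "left" and side != "right":
--             continue
--         if person == "hero":
--             hero_sides.add(side)
--         elif person == "kick" and person_side[("hero", index)] != side:
--             lone_kick_sides.add(side)
--     return not (hero_sides & lone_kick_sides)
-- ===== Notes on version B (the rewrite author's own statement) =====
-- stated objective: alternative
-- what changed: Instead of A's outer loop over ['left','right'] that builds two index-list comprehensions per side, B makes one pass over the keys accumulating a hero_sides set and a lone_kick_sides set and returns whether their intersection is empty; Pre_ excludes association lists with duplicate (person,index) keys (a Python dict cannot hold them) and states in which some 'kick' placed on 'left'/'right' has no ('hero',index) key, on which A raises KeyError or, when the earlier side already fails, returns False just before it would raise, while B raises KeyError on all of them.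
import Mathlib
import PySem

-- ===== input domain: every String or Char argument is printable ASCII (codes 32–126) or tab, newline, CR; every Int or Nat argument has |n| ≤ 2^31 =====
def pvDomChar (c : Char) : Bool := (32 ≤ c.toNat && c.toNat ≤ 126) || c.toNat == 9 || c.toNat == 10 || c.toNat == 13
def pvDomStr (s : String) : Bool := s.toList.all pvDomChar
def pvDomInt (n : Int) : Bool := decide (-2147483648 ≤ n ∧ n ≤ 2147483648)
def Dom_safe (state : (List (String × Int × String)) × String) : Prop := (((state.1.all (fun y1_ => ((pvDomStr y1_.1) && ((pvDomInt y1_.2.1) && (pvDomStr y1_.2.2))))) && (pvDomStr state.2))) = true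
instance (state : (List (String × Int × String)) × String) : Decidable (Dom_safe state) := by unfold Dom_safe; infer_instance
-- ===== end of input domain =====

-- B replaces A's per-side double comprehensions by one pass over the keys collecting two sets
-- (hero sides / lone-sidekick sides) and tests their intersection: an alternative decomposition, same cost.


-- ===== PORT A =====
-- the dict[(person,index)] -> side the Python function receives (insertion order, later duplicates overwrite)
def pvDictOf (l : List (String × Int × String)) : PySem.Dict (String × Int) String :=
  PySem.Dict.ofList (l.map (fun t => ((t.1, t.2.1), t.2.2)))

-- [index for (person,index) in person_side if person=="kick" if d[(person,index)]==side if d[("hero",index)]!=side]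
-- (d[("hero",index)] raises KeyError when the key is absent: Pre_safe excludes that; get? = none then counts as ≠ side)
def pvLoneKik (d : PySem.Dict (String × Int) String) (side : String) : List Int :=
  (d.keys.filter (fun k => k.1 == "kick" && d.get? k == some side && d.get? ("hero", k.2) != some side)).map (·.2)

-- [index for (person,index) in person_side if person=="hero" if d[(person,index)]==side]
def pvPresentHero (d : PySem.Dict (String × Int) String) (side : String) : List Int :=
  (d.keys.filter (fun k => k.1 == "hero" && d.get? k == some side)).map (·.2)

-- for side in ["left","right"]: … if lone_kik and present_hero: return False / return True
def pvSafeLoop (d : PySem.Dict (String × Int) String) : List String → Bool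
  | [] => true
  | side :: rest =>
    if !(pvLoneKik d side).isEmpty && !(pvPresentHero d side).isEmpty then false
    else pvSafeLoop d rest

def safe (state : (List (String × Int × String)) × String) : Bool :=
  pvSafeLoop (pvDictOf state.1) ["left", "right"]

-- ===== PORT B =====
-- one iteration of B's loop body: skip sides other than left/right, collect hero sides and lone-kick sides
def pvAltStep (d : PySem.Dict (String × Int) String)
    (acc : PySem.Set String × PySem.Set String) (k : String × Int) :
    PySem.Set String × PySem.Set String :=
  let side := d.getD k ""   -- person_side[(person,index)]: k is an iterated key, so present
  if side != "left" && side != "right" then acc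
  else if k.1 == "hero" then (PySem.Set.add acc.1 side, acc.2)
  else if k.1 == "kick" && d.get? ("hero", k.2) != some side then (acc.1, PySem.Set.add acc.2 side)
  else acc

def safe_alt (state : (List (String × Int × String)) × String) : Bool :=
  let d := pvDictOf state.1
  let r := d.keys.foldl (pvAltStep d) (PySem.Set.empty, PySem.Set.empty)
  (PySem.Set.inter r.1 r.2).isEmpty   -- not (hero_sides & lone_kick_sides)

-- ===== PRECONDITION & SPEC =====
-- Pre_ excludes (a) association lists with duplicate (person,index) keys — a Python dict cannot hold them, so
-- their list order is not observable — and (b) states in which some 'kick' placed on 'left'/'right' has no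
-- ('hero',index) key: there Python A raises KeyError, or returns False immediately before it would raise.
def Pre_safe (state : (List (String × Int × String)) × String) : Prop :=
  (state.1.map (fun t => (t.1, t.2.1))).Nodup ∧
  ∀ t ∈ state.1, t.1 = "kick" ∧ (t.2.2 = "left" ∨ t.2.2 = "right") →
    ("hero", t.2.1) ∈ state.1.map (fun t => (t.1, t.2.1))
instance (state : (List (String × Int × String)) × String) : Decidable (Pre_safe state) := by
  unfold Pre_safe; infer_instance

def pvWitness_safe : ((List (String × Int × String)) × String) :=
  ([("hero", 0, "left"), ("kick", 0, "left"), ("kick", 1, "boat")], "x")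

def Spec_safe (state : (List (String × Int × String)) × String) (out : Bool) : Prop := out = safe_alt state
instance (state : (List (String × Int × String)) × String) (out : Bool) : Decidable (Spec_safe state out) := by unfold Spec_safe; infer_instance

-- ===== CLAIM (what is proved, stated in full; the proofs are below) =====
def Claim_equal_safe : Prop := ∀ (state : (List (String × Int × String)) × String), Dom_safe state → Pre_safe state → Spec_safe state (safe state)

-- ===== LEMMAS AND PROOFS =====

-- the condition under which B's pass adds x to hero_sides at key k
def HeroP (d : PySem.Dict (String × Int) String) (x : String) (k : String × Int) : Prop :=
  d.get? k = some x ∧ (x = "left" ∨ x = "right") ∧ k.1 = "hero"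

-- the condition under which B's pass adds x to lone_kick_sides at key k
def KickP (d : PySem.Dict (String × Int) String) (x : String) (k : String × Int) : Prop :=
  d.get? k = some x ∧ (x = "left" ∨ x = "right") ∧ k.1 = "kick" ∧ d.get? ("hero", k.2) ≠ some x

lemma getD_some (d : PySem.Dict (String × Int) String) (k : String × Int) (h : d.getD k "" ≠ "") :
    d.get? k = some (d.getD k "") := by
  rw [PySem.Dict.getD_eq_get?_getD] at *
  cases hg : d.get? k with
  | none => rw [hg] at h; simp at h
  | some v => simp

lemma mem_altStep (d : PySem.Dict (String × Int) String)
    (acc : PySem.Set String × PySem.Set String) (k : String × Int) (x : String) :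
    (x ∈ (pvAltStep d acc k).1 ↔ x ∈ acc.1 ∨ HeroP d x k) ∧
    (x ∈ (pvAltStep d acc k).2 ↔ x ∈ acc.2 ∨ KickP d x k) := by
  by_cases hg : (d.getD k "" != "left" && d.getD k "" != "right") = true
  · have hstep : pvAltStep d acc k = acc := by unfold pvAltStep; rw [if_pos hg]
    simp only [bne_iff_ne, ne_eq, Bool.and_eq_true] at hg
    have hno : ∀ (P : Prop), (d.get? k = some x ∧ (x = "left" ∨ x = "right") ∧ P) → False := by
      rintro P ⟨hget, hx, -⟩
      have hgd : d.getD k "" = x := by rw [PySem.Dict.getD_eq_get?_getD, hget]; rfl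
      rcases hx with hx | hx <;> rw [hx] at hgd <;> tauto
    rw [hstep]
    constructor <;> constructor <;> intro h
    · exact Or.inl h
    · rcases h with h | h
      · exact h
      · exact absurd h (hno _)
    · exact Or.inl h
    · rcases h with h | h
      · exact h
      · exact absurd ⟨h.1, h.2.1, h.2.2⟩ (hno (k.1 = "kick" ∧ d.get? ("hero", k.2) ≠ some x))
  · have hlr : d.getD k "" = "left" ∨ d.getD k "" = "right" := by
      simp only [bne_iff_ne, ne_eq, Bool.and_eq_true] at hg; tauto
    have hne : d.getD k "" ≠ "" := by rcases hlr with h | h <;> rw [h] <;> decide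
    have hget : d.get? k = some (d.getD k "") := getD_some d k hne
    have hxiff : ∀ (hx : x = d.getD k ""), d.get? k = some x ∧ (x = "left" ∨ x = "right") := by
      intro hx; subst hx; exact ⟨hget, hlr⟩
    by_cases hh : (k.1 == "hero") = true
    · have hstep : pvAltStep d acc k = (PySem.Set.add acc.1 (d.getD k ""), acc.2) := by
        unfold pvAltStep; rw [if_neg hg, if_pos hh]
      simp only [beq_iff_eq] at hh
      rw [hstep]
      constructor
      · rw [PySem.Set.mem_add]
        constructor
        · rintro (h | h)
          · exact Or.inl h
          · exact Or.inr ⟨(hxiff h).1, (hxiff h).2, hh⟩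
        · rintro (h | h)
          · exact Or.inl h
          · rcases h with ⟨h1, _, _⟩
            right
            rw [hget] at h1; exact (Option.some_inj.mp h1).symm
      · simp only []
        constructor
        · exact Or.inl
        · rintro (h | h)
          · exact h
          · rcases h with ⟨_, _, hk, _⟩
            rw [hh] at hk; exact absurd hk (by decide)
    · by_cases hk : (k.1 == "kick" && d.get? ("hero", k.2) != some (d.getD k "")) = true
      · have hstep : pvAltStep d acc k = (acc.1, PySem.Set.add acc.2 (d.getD k "")) := by
          unfold pvAltStep; rw [if_neg hg, if_neg hh, if_pos hk]
        simp only [Bool.and_eq_true, beq_iff_eq, bne_iff_ne, ne_eq] at hk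
        rw [hstep]
        constructor
        · constructor
          · exact Or.inl
          · rintro (h | h)
            · exact h
            · rcases h with ⟨h1, _, hkk⟩
              rw [hkk] at hh; simp at hh
        · rw [PySem.Set.mem_add]
          constructor
          · rintro (h | h)
            · exact Or.inl h
            · refine Or.inr ⟨(hxiff h).1, (hxiff h).2, hk.1, ?_⟩
              rw [← h] at hk; exact hk.2
          · rintro (h | h)
            · exact Or.inl h
            · rcases h with ⟨h1, _, _, _⟩
              right
              rw [hget] at h1; exact (Option.some_inj.mp h1).symm
      · have hstep : pvAltStep d acc k = acc := by
          unfold pvAltStep; rw [if_neg hg, if_neg hh, if_neg hk]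
        rw [hstep]
        -- neither HeroP nor KickP holds
        constructor <;> constructor
        · exact Or.inl
        · rintro (h | h)
          · exact h
          · rcases h with ⟨h1, _, hkk⟩
            rw [hkk] at hh
            simp at hh
        · exact Or.inl
        · rintro (h | h)
          · exact h
          · rcases h with ⟨h1, _, hkk, hner⟩
            rw [hget] at h1
            have hx : x = d.getD k "" := (Option.some_inj.mp h1).symm
            rw [hx] at hner
            exact absurd (by simp [hkk, hner]) hk

lemma mem_altFold (d : PySem.Dict (String × Int) String)
    (ks : List (String × Int)) (acc : PySem.Set String × PySem.Set String) (x : String) :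
    (x ∈ (ks.foldl (pvAltStep d) acc).1 ↔ x ∈ acc.1 ∨ ∃ k ∈ ks, HeroP d x k) ∧
    (x ∈ (ks.foldl (pvAltStep d) acc).2 ↔ x ∈ acc.2 ∨ ∃ k ∈ ks, KickP d x k) := by
  induction ks generalizing acc with
  | nil => simp
  | cons k ks ih =>
    simp only [List.foldl_cons, List.mem_cons]
    rcases ih (pvAltStep d acc k) with ⟨ih1, ih2⟩
    rcases mem_altStep d acc k x with ⟨hs1, hs2⟩
    constructor
    · rw [ih1, hs1]
      constructor
      · rintro ((h | h) | ⟨k', hk', h⟩)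
        · exact Or.inl h
        · exact Or.inr ⟨k, Or.inl rfl, h⟩
        · exact Or.inr ⟨k', Or.inr hk', h⟩
      · rintro (h | ⟨k', hk' | hk', h⟩)
        · exact Or.inl (Or.inl h)
        · exact Or.inl (Or.inr (hk' ▸ h))
        · exact Or.inr ⟨k', hk', h⟩
    · rw [ih2, hs2]
      constructor
      · rintro ((h | h) | ⟨k', hk', h⟩)
        · exact Or.inl h
        · exact Or.inr ⟨k, Or.inl rfl, h⟩
        · exact Or.inr ⟨k', Or.inr hk', h⟩
      · rintro (h | ⟨k', hk' | hk', h⟩)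
        · exact Or.inl (Or.inl h)
        · exact Or.inl (Or.inr (hk' ▸ h))
        · exact Or.inr ⟨k', hk', h⟩

lemma altPred_hero (d : PySem.Dict (String × Int) String) (s : String)
    (hs : s = "left" ∨ s = "right") (k : String × Int) :
    HeroP d s k ↔ (k.1 == "hero" && d.get? k == some s) = true := by
  unfold HeroP
  simp only [Bool.and_eq_true, beq_iff_eq]
  tauto

lemma altPred_kick (d : PySem.Dict (String × Int) String) (s : String)
    (hs : s = "left" ∨ s = "right") (k : String × Int) :
    KickP d s k ↔ (k.1 == "kick" && d.get? k == some s && d.get? ("hero", k.2) != some s) = true := by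
  unfold KickP
  simp only [Bool.and_eq_true, beq_iff_eq, bne_iff_ne, ne_eq]
  tauto

lemma notEmpty_filterMap {α β : Type} (l : List α) (p : α → Bool) (f : α → β) :
    (!((l.filter p).map f).isEmpty) = true ↔ ∃ k ∈ l, p k = true := by
  simp [List.filter_eq_nil_iff]

lemma cond_iff (d : PySem.Dict (String × Int) String) (s : String) (hs : s = "left" ∨ s = "right") :
    (!(pvLoneKik d s).isEmpty && !(pvPresentHero d s).isEmpty) = true ↔
      (∃ k ∈ d.keys, KickP d s k) ∧ (∃ k ∈ d.keys, HeroP d s k) := by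
  unfold pvLoneKik pvPresentHero
  rw [Bool.and_eq_true, notEmpty_filterMap, notEmpty_filterMap]
  constructor
  · rintro ⟨⟨k, hk, hp⟩, ⟨k', hk', hp'⟩⟩
    exact ⟨⟨k, hk, (altPred_kick d s hs k).mpr hp⟩, ⟨k', hk', (altPred_hero d s hs k').mpr hp'⟩⟩
  · rintro ⟨⟨k, hk, hp⟩, ⟨k', hk', hp'⟩⟩
    exact ⟨⟨k, hk, (altPred_kick d s hs k).mp hp⟩, ⟨k', hk', (altPred_hero d s hs k').mp hp'⟩⟩

lemma safe_eq_alt (d : PySem.Dict (String × Int) String) :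
    pvSafeLoop d ["left", "right"] =
      (let r := d.keys.foldl (pvAltStep d) (PySem.Set.empty, PySem.Set.empty)
       (PySem.Set.inter r.1 r.2).isEmpty) := by
  rw [Bool.eq_iff_iff]
  have hmemH : ∀ x, x ∈ (d.keys.foldl (pvAltStep d) (PySem.Set.empty, PySem.Set.empty)).1 ↔
      ∃ k ∈ d.keys, HeroP d x k := by
    intro x
    rw [(mem_altFold d d.keys (PySem.Set.empty, PySem.Set.empty) x).1]
    simp [PySem.Set.empty]
  have hmemK : ∀ x, x ∈ (d.keys.foldl (pvAltStep d) (PySem.Set.empty, PySem.Set.empty)).2 ↔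
      ∃ k ∈ d.keys, KickP d x k := by
    intro x
    rw [(mem_altFold d d.keys (PySem.Set.empty, PySem.Set.empty) x).2]
    simp [PySem.Set.empty]
  constructor
  · intro hL
    -- LHS true: neither side fires
    have h1 : ¬ ((!(pvLoneKik d "left").isEmpty && !(pvPresentHero d "left").isEmpty) = true) := by
      intro hc
      simp only [pvSafeLoop, hc, if_true] at hL
      exact Bool.false_ne_true hL
    have h2 : ¬ ((!(pvLoneKik d "right").isEmpty && !(pvPresentHero d "right").isEmpty) = true) := by
      intro hc
      simp only [pvSafeLoop, if_neg h1, hc, if_true] at hL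
      exact Bool.false_ne_true hL
    simp only [List.isEmpty_iff, List.eq_nil_iff_forall_not_mem]
    intro x hx
    rw [PySem.Set.mem_inter] at hx
    rcases hx with ⟨hxh, hxk⟩
    rw [hmemH] at hxh
    rw [hmemK] at hxk
    have hxs : x = "left" ∨ x = "right" := by
      rcases hxh with ⟨k, _, _, hs, _⟩; exact hs
    rcases hxs with hxs | hxs
    · subst hxs; exact h1 ((cond_iff d "left" (Or.inl rfl)).mpr ⟨hxk, hxh⟩)
    · subst hxs; exact h2 ((cond_iff d "right" (Or.inr rfl)).mpr ⟨hxk, hxh⟩)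
  · intro hR
    simp only [List.isEmpty_iff, List.eq_nil_iff_forall_not_mem] at hR
    have hno : ∀ s, s = "left" ∨ s = "right" →
        ¬ ((!(pvLoneKik d s).isEmpty && !(pvPresentHero d s).isEmpty) = true) := by
      intro s hs hc
      rcases (cond_iff d s hs).mp hc with ⟨hk, hh⟩
      exact hR s (by rw [PySem.Set.mem_inter, hmemH, hmemK]; exact ⟨hh, hk⟩)
    simp only [pvSafeLoop]
    rw [if_neg (hno "left" (Or.inl rfl)), if_neg (hno "right" (Or.inr rfl))]

-- ===== VERDICT (by name: the statement is the Claim_ definition above) =====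
theorem safe_spec : Claim_equal_safe := by
  intro state _ _
  unfold Spec_safe safe safe_alt
  exact safe_eq_alt (pvDictOf state.1)
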